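-- pv_equiv track=rewrite | github.com/ahra1221/Algorithm | 백준/Silver/1316. 그룹 단어 체커/그룹 단어 체커.py | check_group
-- ===== SOURCE A (Python) =====
-- def check_group(word):
--     g = {word[0]}
--     for i in range(1, len(word)):
--         if word[i] in g:
--             if word[i-1] == word[i]: ## 연속중
--                 continue
--             else:
--                 return False
--         else:
--             g.add(word[i])
--     return True
-- ===== SOURCE B (Python) =====
-- def check_group(word):
--     # run-length-compress: one representative per maximal run of equal adjacent chars
--     keys = [c for i, c in enumerate(word) if i == 0 or word[i - 1] != c]
--     return len(keys) == len(set(keys))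
-- ===== Notes on version B (the rewrite author's own statement) =====
-- stated objective: simpler
-- what changed: B run-length-compresses the word into one representative per adjacent run and then checks distinctness of that key list in a separate pass, instead of A's single scan that maintains a growing seen-set with continue/return-False branching.
import Mathlib
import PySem

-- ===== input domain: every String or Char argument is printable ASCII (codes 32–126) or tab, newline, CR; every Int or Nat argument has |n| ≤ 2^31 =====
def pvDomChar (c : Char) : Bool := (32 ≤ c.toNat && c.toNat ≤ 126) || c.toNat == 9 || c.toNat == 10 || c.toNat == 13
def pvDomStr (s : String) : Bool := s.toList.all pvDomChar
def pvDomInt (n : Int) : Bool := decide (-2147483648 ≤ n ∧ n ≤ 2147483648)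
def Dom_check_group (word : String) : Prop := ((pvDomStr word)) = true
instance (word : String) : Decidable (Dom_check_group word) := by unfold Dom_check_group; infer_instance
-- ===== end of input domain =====

-- B replaces A's single scan with a growing seen-set by run-length compression plus a
-- distinctness check; equivalence is proved on all nonempty words (A raises on "").

-- ===== PORT A =====
-- the for-loop of A: g is the seen-set, prev the previous character, rest the rest of the word
def checkLoop (g : PySem.Set Char) (prev : Char) : List Char → Bool
  | [] => true
  | c :: t =>
    if PySem.Set.contains g c then
      if prev == c then checkLoop g c t else false
    else checkLoop (PySem.Set.add g c) c t

def check_group (word : String) : Bool :=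
  match word.toList with
  | [] => true          -- A raises IndexError on "" (word[0]); excluded by Pre_check_group
  | c :: t => checkLoop (PySem.Set.ofList [c]) c t

-- ===== PORT B =====
-- run-length compression: keep c iff it differs from the previous character p
def compressAux (p : Char) : List Char → List Char
  | [] => []
  | c :: t => if c == p then compressAux c t else c :: compressAux c t

def compress : List Char → List Char
  | [] => []
  | c :: t => c :: compressAux c t

def check_group_alt (word : String) : Bool :=
  let keys := compress word.toList
  keys.length == (PySem.Set.ofList keys).length

-- ===== PRECONDITION & SPEC =====
-- Pre_ excludes only the empty string, on which A raises IndexError at word[0].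
def Pre_check_group (word : String) : Prop := word ≠ ""
instance (word : String) : Decidable (Pre_check_group word) := by unfold Pre_check_group; infer_instance
def pvWitness_check_group : String := "aabba"

def Spec_check_group (word : String) (out : Bool) : Prop := out = check_group_alt word
instance (word : String) (out : Bool) : Decidable (Spec_check_group word out) := by unfold Spec_check_group; infer_instance

-- ===== CLAIM (what is proved, stated in full; the proofs are below) =====
def Claim_equal_check_group : Prop := ∀ (word : String), Dom_check_group word → Pre_check_group word → Spec_check_group word (check_group word)


-- ===== LEMMAS AND PROOFS =====

-- A's loop decides: the compressed keys of the rest are distinct and disjoint from the seen-set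
theorem checkLoop_eq (t : List Char) : ∀ (g : PySem.Set Char) (prev : Char), prev ∈ g →
    checkLoop g prev t =
      decide ((compressAux prev t).Nodup ∧ ∀ x ∈ compressAux prev t, x ∉ g) := by
  induction t with
  | nil => intro g prev _; simp [checkLoop, compressAux]
  | cons c t ih =>
    intro g prev hprev
    by_cases hc : c = prev
    · subst hc
      have hstep : checkLoop g c (c :: t) = checkLoop g c t := by
        simp [checkLoop, PySem.Set.contains, hprev]
      have hcomp : compressAux c (c :: t) = compressAux c t := by simp [compressAux]
      rw [hstep, hcomp, ih g c hprev]
    · by_cases hin : c ∈ g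
      · have hstep : checkLoop g prev (c :: t) = false := by
          simp [checkLoop, PySem.Set.contains, hin, Ne.symm hc]
        have hnot : ¬ ((compressAux prev (c :: t)).Nodup ∧
            ∀ x ∈ compressAux prev (c :: t), x ∉ g) := by
          intro h
          exact h.2 c (by simp [compressAux, hc]) hin
        rw [hstep, decide_eq_false hnot]
      · have hstep : checkLoop g prev (c :: t) = checkLoop (PySem.Set.add g c) c t := by
          simp [checkLoop, PySem.Set.contains, hin]
        have hprev' : c ∈ PySem.Set.add g c := by
          simp [PySem.Set.add, PySem.Set.contains, hin]
        have hcomp : compressAux prev (c :: t) = c :: compressAux c t := by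
          simp [compressAux, hc]
        rw [hstep, ih _ c hprev', hcomp]
        apply decide_eq_decide.mpr
        constructor
        · rintro ⟨hnd, hall⟩
          have hall' : ∀ x ∈ compressAux c t, x ∉ g ∧ x ≠ c := by
            intro x hx
            have := hall x hx
            simp only [PySem.Set.add, PySem.Set.contains] at this
            constructor
            · intro hg; exact this (by simp [hin, hg])
            · intro hxc; exact this (by simp [hin, hxc])
          refine ⟨List.nodup_cons.mpr ⟨fun hcx => (hall' c hcx).2 rfl, hnd⟩, ?_⟩
          intro x hx
          rcases List.mem_cons.mp hx with h | h
          · exact h ▸ hin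
          · exact (hall' x h).1
        · rintro ⟨hnd, hall⟩
          refine ⟨(List.nodup_cons.mp hnd).2, ?_⟩
          intro x hx
          have hxg : x ∉ g := hall x (List.mem_cons_of_mem _ hx)
          have hxc : x ≠ c := fun h => (List.nodup_cons.mp hnd).1 (h ▸ hx)
          simp [PySem.Set.add, PySem.Set.contains, hin, hxg, hxc]

-- length equality against set(keys) is exactly distinctness
theorem length_eq_ofList_iff (l : List Char) :
    (l.length == (PySem.Set.ofList l).length : Bool) = decide l.Nodup := by
  induction l with
  | nil => simp [PySem.Set.ofList]
  | cons x xs ih =>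
    rw [PySem.Set.ofList_cons]
    by_cases hx : x ∈ xs
    · have hx' : x ∈ PySem.Set.ofList xs := (PySem.Set.mem_ofList _ _).mpr hx
      have hlt : (PySem.Set.discard (PySem.Set.ofList xs) x).length
          < (PySem.Set.ofList xs).length := by
        simp only [PySem.Set.discard]
        exact List.length_filter_lt_length_iff_exists.mpr ⟨x, hx', by simp⟩
      have hle : (PySem.Set.ofList xs).length ≤ xs.length := PySem.Set.length_ofList_le xs
      have hne : ((x :: xs).length == (x :: PySem.Set.discard (PySem.Set.ofList xs) x).length : Bool) = false := by
        simp only [List.length_cons, beq_eq_false_iff_ne, ne_eq]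
        omega
      rw [hne]
      simp [List.nodup_cons, hx]
    · have hdis : PySem.Set.discard (PySem.Set.ofList xs) x = PySem.Set.ofList xs := by
        simp only [PySem.Set.discard]
        apply List.filter_eq_self.mpr
        intro a ha
        simp only [Bool.not_eq_eq_eq_not, Bool.not_true, beq_eq_false_iff_ne, ne_eq]
        intro h; exact hx ((PySem.Set.mem_ofList _ _).mp (h ▸ ha))
      have : ((x :: xs).length == (x :: PySem.Set.ofList xs).length : Bool)
          = (xs.length == (PySem.Set.ofList xs).length : Bool) := by
        simp [List.length_cons]
      rw [hdis, this, ih]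
      simp [List.nodup_cons, hx]

-- ===== VERDICT (by name: the statement is the Claim_ definition above) =====
theorem check_group_spec : Claim_equal_check_group := by
  intro word _ hpre
  unfold Spec_check_group check_group check_group_alt
  rcases hlist : word.toList with _ | ⟨c, t⟩
  · exact absurd (by cases word; simp_all) hpre
  · change checkLoop (PySem.Set.ofList [c]) c t = _
    have hc : c ∈ PySem.Set.ofList [c] := (PySem.Set.mem_ofList _ _).mpr (by simp)
    rw [checkLoop_eq t _ c hc]
    have : compress (c :: t) = c :: compressAux c t := rfl
    rw [this, length_eq_ofList_iff]
    apply (decide_eq_decide.mpr _).symm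
    constructor
    · rintro hnd
      refine ⟨(List.nodup_cons.mp hnd).2, ?_⟩
      intro x hx hxg
      have : x = c := by simpa using (PySem.Set.mem_ofList _ _).mp hxg
      exact (List.nodup_cons.mp hnd).1 (this ▸ hx)
    · rintro ⟨hnd, hall⟩
      refine List.nodup_cons.mpr ⟨fun hcx => hall c hcx ((PySem.Set.mem_ofList _ _).mpr (by simp)), hnd⟩
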